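-- pv_equiv track=rewrite | github.com/Asz69420/autoquant-workspace | scripts/pipeline/analyser_outcome_worker.py | select_relevant_doctrine
-- ===== SOURCE A (Python) =====
-- def select_relevant_doctrine(doctrine: str, indicators: list[str]) -> str:
--     lines = [ln.strip() for ln in str(doctrine or '').splitlines() if ln.strip().startswith('- [')]
--     if not lines:
--         return (doctrine or '')[:1000]
--     inds = [str(x).lower() for x in (indicators or [])]
--
--     def score(line: str) -> int:
--         low = line.lower()
--         s = 0
--         if any(i and i in low for i in inds):
--             s += 3
--         if any(k in low for k in ['regime', 'risk gating', 'drawdown', 'session gate']):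
--             s += 2
--         return s
--
--     ranked = sorted(lines, key=lambda x: score(x), reverse=True)
--     chosen = ranked[:5] if ranked else lines[:5]
--     txt = '\n'.join(chosen)
--     return txt[:1000]
-- ===== SOURCE B (Python) =====
-- def select_relevant_doctrine(doctrine: str, indicators: list[str]) -> str:
--     src = str(doctrine or '')
--     lines = [ln.strip() for ln in src.splitlines() if ln.strip().startswith('- [')]
--     if not lines:
--         return src[:1000]
--     inds = [str(x).lower() for x in (indicators or []) if x]
--     kws = ['regime', 'risk gating', 'drawdown', 'session gate']
--     # one scoring pass into buckets (scores can only be 5, 3, 2 or 0);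
--     # concatenating buckets high-to-low reproduces the stable descending sort
--     b5, b3, b2, b0 = [], [], [], []
--     for t in lines:
--         low = t.lower()
--         s = (3 if any(i in low for i in inds) else 0) + \
--             (2 if any(k in low for k in kws) else 0)
--         (b5 if s == 5 else b3 if s == 3 else b2 if s == 2 else b0).append(t)
--     chosen = (b5 + b3 + b2 + b0)[:5]
--     return '\n'.join(chosen)[:1000]
-- ===== Notes on version B (the rewrite author's own statement) =====
-- stated objective: alternative
-- what changed: Replaces the stable descending sort by score with a single scoring pass that drops each line into one of four score buckets (5/3/2/0) and concatenates the buckets high-to-low, preserving in-bucket insertion order; empty indicators are filtered out once instead of re-tested per line.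
import Mathlib
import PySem

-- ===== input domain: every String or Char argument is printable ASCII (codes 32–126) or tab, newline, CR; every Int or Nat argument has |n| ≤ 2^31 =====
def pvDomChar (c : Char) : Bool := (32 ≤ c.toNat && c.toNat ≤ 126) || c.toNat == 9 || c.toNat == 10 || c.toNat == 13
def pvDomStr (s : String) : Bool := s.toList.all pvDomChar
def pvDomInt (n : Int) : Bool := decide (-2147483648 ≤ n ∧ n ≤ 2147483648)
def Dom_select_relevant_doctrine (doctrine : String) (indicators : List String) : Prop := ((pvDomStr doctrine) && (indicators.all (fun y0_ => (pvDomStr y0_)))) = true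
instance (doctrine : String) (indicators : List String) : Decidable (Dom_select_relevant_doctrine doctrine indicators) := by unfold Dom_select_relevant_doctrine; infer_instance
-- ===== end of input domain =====

-- B replaces A's stable descending sort by score with one scoring pass into four score
-- buckets (5/3/2/0) concatenated high-to-low: alternative decomposition, same cost class.

-- ===== PORT A =====
def srdScoreA (inds : List String) (line : String) : Int :=
  let low := PySem.Str.lower line
  let s : Int := 0
  let s := if inds.any (fun i => !(i == "") && PySem.Str.isIn i low) then s + 3 else s
  let s := if (["regime", "risk gating", "drawdown", "session gate"]).any
      (fun k => PySem.Str.isIn k low) then s + 2 else s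
  s

def select_relevant_doctrine (doctrine : String) (indicators : List String) : String :=
  let lines := ((PySem.Str.splitlines doctrine).filter
      (fun ln => PySem.Str.startswith (PySem.Str.strip ln) "- [")).map PySem.Str.strip
  if lines = [] then PySem.Str.slice doctrine none (some 1000)
  else
    let inds := indicators.map PySem.Str.lower
    let ranked := PySem.List.sorted lines (srdScoreA inds) true
    let chosen := if ranked ≠ [] then PySem.List.slice ranked none (some 5)
                  else PySem.List.slice lines none (some 5)
    PySem.Str.slice (PySem.Str.join "\n" chosen) none (some 1000)

-- ===== PORT B =====
def srdScoreB (inds : List String) (low : String) : Int :=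
  (if inds.any (fun i => PySem.Str.isIn i low) then (3 : Int) else 0) +
  (if (["regime", "risk gating", "drawdown", "session gate"]).any
      (fun k => PySem.Str.isIn k low) then (2 : Int) else 0)

def srdStep (inds : List String)
    (acc : List String × List String × List String × List String) (t : String) :
    List String × List String × List String × List String :=
  let s := srdScoreB inds (PySem.Str.lower t)
  if s == 5 then (acc.1 ++ [t], acc.2.1, acc.2.2.1, acc.2.2.2)
  else if s == 3 then (acc.1, acc.2.1 ++ [t], acc.2.2.1, acc.2.2.2)
  else if s == 2 then (acc.1, acc.2.1, acc.2.2.1 ++ [t], acc.2.2.2)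
  else (acc.1, acc.2.1, acc.2.2.1, acc.2.2.2 ++ [t])

def select_relevant_doctrine_alt (doctrine : String) (indicators : List String) : String :=
  let lines := ((PySem.Str.splitlines doctrine).filter
      (fun ln => PySem.Str.startswith (PySem.Str.strip ln) "- [")).map PySem.Str.strip
  if lines = [] then PySem.Str.slice doctrine none (some 1000)
  else
    let inds := (indicators.filter (fun x => !(x == ""))).map PySem.Str.lower
    let b := lines.foldl (srdStep inds) ([], [], [], [])
    let chosen := PySem.List.slice (b.1 ++ b.2.1 ++ b.2.2.1 ++ b.2.2.2) none (some 5)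
    PySem.Str.slice (PySem.Str.join "\n" chosen) none (some 1000)

-- ===== PRECONDITION & SPEC =====
def Spec_select_relevant_doctrine (doctrine : String) (indicators : List String) (out : String) : Prop := out = select_relevant_doctrine_alt doctrine indicators
instance (doctrine : String) (indicators : List String) (out : String) : Decidable (Spec_select_relevant_doctrine doctrine indicators out) := by unfold Spec_select_relevant_doctrine; infer_instance

-- ===== CLAIM (what is proved, stated in full; the proofs are below) =====
def Claim_equal_select_relevant_doctrine : Prop := ∀ (doctrine : String) (indicators : List String), Dom_select_relevant_doctrine doctrine indicators → Spec_select_relevant_doctrine doctrine indicators (select_relevant_doctrine doctrine indicators)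

-- ===== LEMMAS AND PROOFS =====

theorem srd_insertBy_all_before {α : Type} (before : α → α → Bool) (x : α) (L : List α)
    (h : ∀ y ∈ L, before x y = true) : PySem.List.insertBy before x L = x :: L := by
  cases L with
  | nil => rfl
  | cons b B => simp [PySem.List.insertBy, h b (by simp)]

theorem srd_insertBy_append {α : Type} (before : α → α → Bool) (x : α) (A B : List α)
    (hA : ∀ y ∈ A, before x y = false) :
    PySem.List.insertBy before x (A ++ B) = A ++ PySem.List.insertBy before x B := by
  induction A with
  | nil => simp
  | cons a A ih =>
    simp only [List.cons_append, PySem.List.insertBy, hA a (by simp), Bool.false_eq_true,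
      if_false]
    exact congrArg (a :: ·) (ih (fun y hy => hA y (by simp [hy])))

theorem srd_insertBy_all_not_before {α : Type} (before : α → α → Bool) (x : α) (L : List α)
    (h : ∀ y ∈ L, before x y = false) : PySem.List.insertBy before x L = L ++ [x] := by
  have e : L = L ++ [] := by simp
  rw [e, srd_insertBy_append before x L [] (fun y hy => h y (by simpa using hy))]
  simp [PySem.List.insertBy]

theorem srd_mem_snoc {α : Type} (key : α → Int) (v : Int) (b : List α) (x : α)
    (hb : ∀ y ∈ b, key y = v) (hx : key x = v) : ∀ y ∈ b ++ [x], key y = v := by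
  intro y hy
  rcases List.mem_append.1 hy with h | h
  · exact hb y h
  · simp at h; subst h; exact hx

theorem srd_buckets {α : Type} (key : α → Int)
    (hkey : ∀ t : α, key t = 5 ∨ key t = 3 ∨ key t = 2 ∨ key t = 0)
    (xs : List α) :
    ∀ (b5 b3 b2 b0 : List α),
      (∀ y ∈ b5, key y = 5) → (∀ y ∈ b3, key y = 3) →
      (∀ y ∈ b2, key y = 2) → (∀ y ∈ b0, key y = 0) →
      xs.foldl (fun acc x => PySem.List.insertBy (fun a b => decide (key b < key a)) x acc)
        (b5 ++ b3 ++ b2 ++ b0)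
      = (b5 ++ xs.filter (fun t => key t == 5)) ++ (b3 ++ xs.filter (fun t => key t == 3))
        ++ (b2 ++ xs.filter (fun t => key t == 2)) ++ (b0 ++ xs.filter (fun t => key t == 0)) := by
  induction xs with
  | nil => intro b5 b3 b2 b0 _ _ _ _; simp
  | cons x xs ih =>
    intro b5 b3 b2 b0 h5 h3 h2 h0
    rcases hkey x with hx | hx | hx | hx
    · -- key x = 5 : x goes to the end of bucket 5
      have hA : ∀ y ∈ b5, (decide (key y < key x)) = false := by
        intro y hy; rw [h5 y hy, hx]; decide
      have hB : ∀ y ∈ b3 ++ b2 ++ b0, (decide (key y < key x)) = true := by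
        intro y hy; rw [hx]
        simp only [List.append_assoc, List.mem_append] at hy
        rcases hy with h | h | h
        · rw [h3 y h]; decide
        · rw [h2 y h]; decide
        · rw [h0 y h]; decide
      have step : PySem.List.insertBy (fun a b => decide (key b < key a)) x
          (b5 ++ b3 ++ b2 ++ b0) = (b5 ++ [x]) ++ b3 ++ b2 ++ b0 := by
        have e : b5 ++ b3 ++ b2 ++ b0 = b5 ++ (b3 ++ b2 ++ b0) := by simp
        rw [e, srd_insertBy_append _ _ _ _ hA, srd_insertBy_all_before _ _ _ hB]
        simp
      rw [List.foldl_cons, step, ih (b5 ++ [x]) b3 b2 b0 (srd_mem_snoc key 5 b5 x h5 hx) h3 h2 h0]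
      simp [hx]
    · -- key x = 3
      have hA : ∀ y ∈ b5 ++ b3, (decide (key y < key x)) = false := by
        intro y hy; rw [hx]
        rcases List.mem_append.1 hy with h | h
        · rw [h5 y h]; decide
        · rw [h3 y h]; decide
      have hB : ∀ y ∈ b2 ++ b0, (decide (key y < key x)) = true := by
        intro y hy; rw [hx]
        rcases List.mem_append.1 hy with h | h
        · rw [h2 y h]; decide
        · rw [h0 y h]; decide
      have step : PySem.List.insertBy (fun a b => decide (key b < key a)) x
          (b5 ++ b3 ++ b2 ++ b0) = b5 ++ (b3 ++ [x]) ++ b2 ++ b0 := by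
        have e : b5 ++ b3 ++ b2 ++ b0 = (b5 ++ b3) ++ (b2 ++ b0) := by simp
        rw [e, srd_insertBy_append _ _ _ _ hA, srd_insertBy_all_before _ _ _ hB]
        simp
      rw [List.foldl_cons, step, ih b5 (b3 ++ [x]) b2 b0 h5 (srd_mem_snoc key 3 b3 x h3 hx) h2 h0]
      simp [hx]
    · -- key x = 2
      have hA : ∀ y ∈ b5 ++ b3 ++ b2, (decide (key y < key x)) = false := by
        intro y hy; rw [hx]
        simp only [List.append_assoc, List.mem_append] at hy
        rcases hy with h | h | h
        · rw [h5 y h]; decide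
        · rw [h3 y h]; decide
        · rw [h2 y h]; decide
      have hB : ∀ y ∈ b0, (decide (key y < key x)) = true := by
        intro y hy; rw [hx, h0 y hy]; decide
      have step : PySem.List.insertBy (fun a b => decide (key b < key a)) x
          (b5 ++ b3 ++ b2 ++ b0) = b5 ++ b3 ++ (b2 ++ [x]) ++ b0 := by
        have e : b5 ++ b3 ++ b2 ++ b0 = (b5 ++ b3 ++ b2) ++ b0 := rfl
        rw [e, srd_insertBy_append _ _ _ _ hA, srd_insertBy_all_before _ _ _ hB]
        simp
      rw [List.foldl_cons, step, ih b5 b3 (b2 ++ [x]) b0 h5 h3 (srd_mem_snoc key 2 b2 x h2 hx) h0]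
      simp [hx]
    · -- key x = 0 : x goes to the very end
      have hA : ∀ y ∈ b5 ++ b3 ++ b2 ++ b0, (decide (key y < key x)) = false := by
        intro y hy; rw [hx]
        simp only [List.append_assoc, List.mem_append] at hy
        rcases hy with h | h | h | h
        · rw [h5 y h]; decide
        · rw [h3 y h]; decide
        · rw [h2 y h]; decide
        · rw [h0 y h]; decide
      have step : PySem.List.insertBy (fun a b => decide (key b < key a)) x
          (b5 ++ b3 ++ b2 ++ b0) = b5 ++ b3 ++ b2 ++ (b0 ++ [x]) := by
        rw [srd_insertBy_all_not_before _ _ _ hA]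
        simp
      rw [List.foldl_cons, step, ih b5 b3 b2 (b0 ++ [x]) h5 h3 h2 (srd_mem_snoc key 0 b0 x h0 hx)]
      simp [hx]

theorem srd_scoreB_vals (inds : List String) (low : String) :
    srdScoreB inds low = 5 ∨ srdScoreB inds low = 3 ∨
    srdScoreB inds low = 2 ∨ srdScoreB inds low = 0 := by
  unfold srdScoreB; split_ifs <;> norm_num

theorem srd_foldB (inds : List String) (xs : List String) :
    ∀ (a5 a3 a2 a0 : List String),
      xs.foldl (srdStep inds) (a5, a3, a2, a0)
      = (a5 ++ xs.filter (fun t => srdScoreB inds (PySem.Str.lower t) == 5),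
         a3 ++ xs.filter (fun t => srdScoreB inds (PySem.Str.lower t) == 3),
         a2 ++ xs.filter (fun t => srdScoreB inds (PySem.Str.lower t) == 2),
         a0 ++ xs.filter (fun t => srdScoreB inds (PySem.Str.lower t) == 0)) := by
  induction xs with
  | nil => intro a5 a3 a2 a0; simp
  | cons x xs ih =>
    intro a5 a3 a2 a0
    rcases srd_scoreB_vals inds (PySem.Str.lower x) with hx | hx | hx | hx <;>
      simp [List.foldl_cons, srdStep, hx, ih]

theorem srd_lower_eq_empty_iff (s : String) : PySem.Str.lower s = "" ↔ s = "" := by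
  constructor <;> intro h
  · have := congrArg String.toList h
    simp [PySem.Str.toList_lower, PySem.Chars.lower] at this
    exact String.ext (by simp [this])
  · subst h; rfl

theorem srd_any_eq (low : String) (indicators : List String) :
    (indicators.map PySem.Str.lower).any (fun i => !(i == "") && PySem.Str.isIn i low)
    = ((indicators.filter (fun x => !(x == ""))).map PySem.Str.lower).any
        (fun i => PySem.Str.isIn i low) := by
  induction indicators with
  | nil => rfl
  | cons x xs ih =>
    by_cases hx : x = ""
    · subst hx
      rw [List.map_cons, List.any_cons, List.filter_cons]
      rw [if_neg (by decide : ¬((!(("" : String) == "")) = true))]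
      rw [(by decide : ((PySem.Str.lower "" == "")) = true)]
      simp only [Bool.not_true, Bool.false_and, Bool.false_or]
      exact ih
    · have hlxb : (PySem.Str.lower x == "") = false :=
        beq_eq_false_iff_ne.mpr (fun h => hx ((srd_lower_eq_empty_iff x).1 h))
      have hxb : (x == "") = false := beq_eq_false_iff_ne.mpr hx
      rw [List.map_cons, List.any_cons, List.filter_cons, hxb]
      rw [if_pos (by decide : (!false) = true)]
      rw [List.map_cons, List.any_cons, hlxb]
      simp only [Bool.not_false, Bool.true_and]
      rw [ih]

theorem srd_score_eq (indicators : List String) (line : String) :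
    srdScoreA (indicators.map PySem.Str.lower) line
    = srdScoreB ((indicators.filter (fun x => !(x == ""))).map PySem.Str.lower)
        (PySem.Str.lower line) := by
  simp only [srdScoreA, srdScoreB]
  rw [srd_any_eq (PySem.Str.lower line) indicators]
  split_ifs <;> norm_num

theorem select_relevant_doctrine_spec_aux (doctrine : String) (indicators : List String) :
    select_relevant_doctrine doctrine indicators
    = select_relevant_doctrine_alt doctrine indicators := by
  simp only [select_relevant_doctrine, select_relevant_doctrine_alt]
  by_cases hnil : ((PySem.Str.splitlines doctrine).filter
      (fun ln => PySem.Str.startswith (PySem.Str.strip ln) "- [")).map PySem.Str.strip = []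
  · rw [if_pos hnil, if_pos hnil]
  · rw [if_neg hnil, if_neg hnil]
    have hrk : PySem.List.sorted
        (((PySem.Str.splitlines doctrine).filter
          (fun ln => PySem.Str.startswith (PySem.Str.strip ln) "- [")).map PySem.Str.strip)
        (srdScoreA (indicators.map PySem.Str.lower)) true ≠ [] := by
      rw [Ne, PySem.List.sorted_eq_nil_iff]; exact hnil
    rw [if_pos hrk]
    have hsort : PySem.List.sorted
        (((PySem.Str.splitlines doctrine).filter
          (fun ln => PySem.Str.startswith (PySem.Str.strip ln) "- [")).map PySem.Str.strip)
        (srdScoreA (indicators.map PySem.Str.lower)) true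
        = (((PySem.Str.splitlines doctrine).filter
            (fun ln => PySem.Str.startswith (PySem.Str.strip ln) "- [")).map PySem.Str.strip).filter
            (fun t => srdScoreB ((indicators.filter (fun x => !(x == ""))).map PySem.Str.lower)
              (PySem.Str.lower t) == 5)
          ++ (((PySem.Str.splitlines doctrine).filter
            (fun ln => PySem.Str.startswith (PySem.Str.strip ln) "- [")).map PySem.Str.strip).filter
            (fun t => srdScoreB ((indicators.filter (fun x => !(x == ""))).map PySem.Str.lower)
              (PySem.Str.lower t) == 3)
          ++ (((PySem.Str.splitlines doctrine).filter
            (fun ln => PySem.Str.startswith (PySem.Str.strip ln) "- [")).map PySem.Str.strip).filter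
            (fun t => srdScoreB ((indicators.filter (fun x => !(x == ""))).map PySem.Str.lower)
              (PySem.Str.lower t) == 2)
          ++ (((PySem.Str.splitlines doctrine).filter
            (fun ln => PySem.Str.startswith (PySem.Str.strip ln) "- [")).map PySem.Str.strip).filter
            (fun t => srdScoreB ((indicators.filter (fun x => !(x == ""))).map PySem.Str.lower)
              (PySem.Str.lower t) == 0) := by
      have hk : srdScoreA (indicators.map PySem.Str.lower)
          = fun t => srdScoreB ((indicators.filter (fun x => !(x == ""))).map PySem.Str.lower)
              (PySem.Str.lower t) := funext (srd_score_eq indicators)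
      rw [hk, PySem.List.sorted_rev_eq_foldl_insertBy]
      have := srd_buckets
        (fun t => srdScoreB ((indicators.filter (fun x => !(x == ""))).map PySem.Str.lower)
          (PySem.Str.lower t))
        (fun t => srd_scoreB_vals _ (PySem.Str.lower t))
        (((PySem.Str.splitlines doctrine).filter
          (fun ln => PySem.Str.startswith (PySem.Str.strip ln) "- [")).map PySem.Str.strip)
        [] [] [] [] (by simp) (by simp) (by simp) (by simp)
      simpa using this
    rw [hsort, srd_foldB]
    simp

-- ===== VERDICT (by name: the statement is the Claim_ definition above) =====
theorem select_relevant_doctrine_spec : Claim_equal_select_relevant_doctrine := by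
  intro doctrine indicators _
  exact select_relevant_doctrine_spec_aux doctrine indicators
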